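-- pv_equiv track=rewrite | github.com/KermitYao/Scripts | py/keygen.py | time_en
-- ===== SOURCE A (Python) =====
-- def time_en(times):
--     sum=0
--     for i in range(0,times):
--         if sum%10==3:
--             n=4
--         else:
--             n=3
--         sum+=n
--     if str(sum)[-1]=='3':
--         return sum+26
--     else:
--         return sum+25
--     return sum
-- ===== SOURCE B (Python) =====
-- def time_en(times):
--     # Closed form: the loop's value after t steps is 10*(t//3) + (0, 3, 7)[t % 3],
--     # and the "last digit is 3" adjustment fires exactly when t % 3 == 1.
--     t = times if times > 0 else 0
--     q, r = divmod(t, 3)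
--     base = 3 if r == 1 else (7 if r == 2 else 0)
--     bonus = 26 if r == 1 else 25
--     return 10 * q + base + bonus
-- ===== Notes on version B (the rewrite author's own statement) =====
-- stated objective: faster
-- what changed: Replaced the linear digit-dependent accumulation loop and the string last-digit test by a constant-time closed-form formula: the loop gains a fixed amount every third step, so divmod of the count by the period gives the sum and the final adjustment directly.
import Mathlib
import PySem

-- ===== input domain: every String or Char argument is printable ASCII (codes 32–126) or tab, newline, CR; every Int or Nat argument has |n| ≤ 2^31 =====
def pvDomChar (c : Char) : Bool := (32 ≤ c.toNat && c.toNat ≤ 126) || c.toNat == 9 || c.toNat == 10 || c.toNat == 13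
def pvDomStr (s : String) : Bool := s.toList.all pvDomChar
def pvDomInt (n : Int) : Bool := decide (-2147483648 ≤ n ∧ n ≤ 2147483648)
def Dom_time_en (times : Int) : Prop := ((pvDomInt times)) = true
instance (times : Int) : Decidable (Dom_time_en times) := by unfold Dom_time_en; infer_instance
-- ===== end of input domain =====

-- B replaces A's O(times) accumulation loop and string last-digit test by a closed-form
-- O(1) formula via divmod(times, 3) (objective: faster, asymptotic).

-- ===== PORT A =====
-- loop body of A: n = 4 if sum % 10 == 3 else 3; sum += n
def timeEnStep (sum : Int) : Int :=
  let n : Int := if PySem.Int.mod sum 10 == 3 then 4 else 3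
  sum + n

def time_en (times : Int) : Int :=
  let sum := (PySem.List.pyRange 0 times 1).foldl (fun sum _i => timeEnStep sum) 0
  if PySem.Str.pyGet? (PySem.Int.toStr sum) (-1) == some '3' then sum + 26 else sum + 25

-- ===== PORT B =====
def time_en_alt (times : Int) : Int :=
  let t : Int := if times > 0 then times else 0
  let q : Int := PySem.Int.floordiv t 3
  let r : Int := PySem.Int.mod t 3
  let base : Int := if r == 1 then 3 else if r == 2 then 7 else 0
  let bonus : Int := if r == 1 then 26 else 25
  10 * q + base + bonus

-- ===== PRECONDITION & SPEC =====
def Spec_time_en (times : Int) (out : Int) : Prop := out = time_en_alt times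
instance (times : Int) (out : Int) : Decidable (Spec_time_en times out) := by unfold Spec_time_en; infer_instance

-- ===== CLAIM (what is proved, stated in full; the proofs are below) =====
def Claim_equal_time_en : Prop := ∀ (times : Int), Dom_time_en times → Spec_time_en times (time_en times)

-- ===== LEMMAS AND PROOFS =====

-- the loop's state after k iterations, in closed form
theorem timeEnStep_iterate (k : Nat) :
    timeEnStep^[k] 0
      = 10 * ((k / 3 : Nat) : Int)
          + (if k % 3 = 1 then 3 else if k % 3 = 2 then 7 else 0) := by
  induction k with
  | zero => simp
  | succ k ih =>
    rw [Function.iterate_succ_apply', ih]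
    have hmod : ∀ s : Int, PySem.Int.mod s 10 = s % 10 :=
      fun s => PySem.Int.mod_eq_emod_of_pos (by norm_num)
    unfold timeEnStep
    simp only [hmod, beq_iff_eq]
    have e3 : k % 3 = 0 ∨ k % 3 = 1 ∨ k % 3 = 2 := by omega
    rcases e3 with e | e | e
    · have h1 : (k + 1) % 3 = 1 := by omega
      have h2 : (k + 1) / 3 = k / 3 := by omega
      simp only [e, h1, h2]
      norm_num
    · have h1 : (k + 1) % 3 = 2 := by omega
      have h2 : (k + 1) / 3 = k / 3 := by omega
      simp only [e, h1, h2]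
      norm_num
      omega
    · have h1 : (k + 1) % 3 = 0 := by omega
      have h2 : (k + 1) / 3 = k / 3 + 1 := by omega
      simp only [e, h1, h2]
      norm_num
      omega

-- last character of str(s) for s ≥ 0
theorem lastChar_toStr (s : Int) (hs : 0 ≤ s) :
    PySem.List.pyGet? (PySem.Int.toChars s) (-1) = some (Nat.digitChar (s.toNat % 10)) := by
  have h2 : PySem.Int.toChars s = Nat.toDigits 10 s.toNat := by
    simp [PySem.Int.toChars, not_lt.mpr hs]
  simp [h2, PySem.List.pyGet?_neg_one]
  rw [Nat.toDigits_eq_if (by omega)]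
  split
  · next h => simp [Nat.mod_eq_of_lt h]
  · simp

-- ===== VERDICT (by name: the statement is the Claim_ definition above) =====
theorem time_en_spec : Claim_equal_time_en := by
  intro times _hdom
  unfold Spec_time_en time_en time_en_alt
  by_cases hpos : 0 < times
  · obtain ⟨n, rfl⟩ : ∃ n : Nat, times = (n : Int) :=
      ⟨times.toNat, (Int.toNat_of_nonneg hpos.le).symm⟩
    rw [PySem.List.pyRange_zero_natCast, List.foldl_const, List.length_map,
        List.length_range, timeEnStep_iterate]
    have hq : (0:Int) ≤ ((n / 3 : Nat) : Int) := by positivity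
    have e3 : n % 3 = 0 ∨ n % 3 = 1 ∨ n % 3 = 2 := by omega
    have hB : PySem.Int.floordiv (n : Int) 3 = ((n / 3 : Nat) : Int) :=
      PySem.Int.floordiv_natCast n 3
    have hBr : PySem.Int.mod (n : Int) 3 = ((n % 3 : Nat) : Int) :=
      PySem.Int.mod_natCast n 3
    simp only [hpos, if_pos, hB, hBr]
    rcases e3 with e | e | e
    · simp only [e]
      norm_num
      rw [lastChar_toStr _ (by omega)]
      have hd : (10 * ((n : Int) / 3)).toNat % 10 = 0 := by omega
      rw [hd]
      decide
    · simp only [e]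
      norm_num
      rw [lastChar_toStr _ (by omega)]
      have hd : (10 * ((n : Int) / 3) + 3).toNat % 10 = 3 := by omega
      rw [hd]
      decide
    · simp only [e]
      norm_num
      rw [lastChar_toStr _ (by omega)]
      have hd : (10 * ((n : Int) / 3) + 7).toNat % 10 = 7 := by omega
      rw [hd]
      decide
  · have hempty : PySem.List.pyRange 0 times 1 = [] := by
      simp [PySem.List.pyRange, hpos]
    rw [hempty]
    simp only [if_neg hpos, List.foldl_nil]
    decide
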